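-- pv_equiv track=rewrite | github.com/Sumatibajhal/Wipro-Talentnext-Python | Wipro_Talentnext_Python/Functions/mini_project.py/mini_proj_2.py | frequency_of_letters
-- ===== SOURCE A (Python) =====
-- def frequency_of_letters(name):
--     frequency = {}
--     for char in name.lower():
--         if char.isalpha():
--             frequency[char] = frequency.get(char, 0) + 1
--
--     output_parts = []
--     for char in sorted(frequency.keys()):
--         output_parts.append(f"{char}-{frequency[char]}")
--     return "Frequency of letters: " + ", ".join(output_parts)
-- ===== SOURCE B (Python) =====
-- def frequency_of_letters(name):
--     chars = sorted(c for c in name.lower() if c.isalpha())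
--     parts = []
--     i = 0
--     n = len(chars)
--     while i < n:
--         j = i + 1
--         while j < n and chars[j] == chars[i]:
--             j += 1
--         parts.append(f"{chars[i]}-{j - i}")
--         i = j
--     return "Frequency of letters: " + ", ".join(parts)
-- ===== Notes on version B (the rewrite author's own statement) =====
-- stated objective: alternative
-- what changed: B sorts the lowercased alphabetic characters once and emits consecutive equal runs with their lengths, instead of building a frequency dict and then sorting its keys.
import Mathlib
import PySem

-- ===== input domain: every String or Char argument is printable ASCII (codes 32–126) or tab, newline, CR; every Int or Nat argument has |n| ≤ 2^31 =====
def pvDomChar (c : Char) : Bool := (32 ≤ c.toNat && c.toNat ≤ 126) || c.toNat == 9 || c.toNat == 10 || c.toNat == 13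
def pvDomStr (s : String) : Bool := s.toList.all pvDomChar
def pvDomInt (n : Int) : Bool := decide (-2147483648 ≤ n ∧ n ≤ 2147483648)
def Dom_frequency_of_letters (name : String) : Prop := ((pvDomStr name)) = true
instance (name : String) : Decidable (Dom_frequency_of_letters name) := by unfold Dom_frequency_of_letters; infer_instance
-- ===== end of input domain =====

-- B groups consecutive runs of the sorted letter list instead of A's frequency dict + sorted keys; objective: alternative (same value, different algorithm).

-- ===== PORT A =====
-- frequency[char] on a key drawn from frequency.keys() always hits: ported as getD (exact here).
def frequency_of_letters (name : String) : String :=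
  let freq := (PySem.Str.lower name).toList.foldl
      (fun d c => if PySem.Chars.isalpha c then d.insert c (d.getD c 0 + 1) else d)
      (PySem.Dict.empty : PySem.Dict Char Int)
  let parts := (PySem.List.sorted freq.keys (fun x => x) false).foldl
      (fun acc c => acc ++ [String.mk [c] ++ "-" ++ PySem.Int.toStr (freq.getD c 0)])
      ([] : List String)
  "Frequency of letters: " ++ PySem.Str.join ", " parts

-- ===== PORT B =====
-- the two index while-loops of Source B: emit the head's run (j - i = 1 + length of the equal prefix), continue past it
def pvGroupRuns : List Char → List String
  | [] => []
  | c :: rest =>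
    (String.mk [c] ++ "-" ++ PySem.Int.toStr (1 + ((rest.takeWhile (fun x => x == c)).length : Int)))
      :: pvGroupRuns (rest.dropWhile (fun x => x == c))
termination_by l => l.length
decreasing_by
  exact Nat.lt_succ_of_le (List.length_dropWhile_le _ _)

def frequency_of_letters_alt (name : String) : String :=
  let chars := PySem.List.sorted ((PySem.Str.lower name).toList.filter PySem.Chars.isalpha) (fun x => x) false
  "Frequency of letters: " ++ PySem.Str.join ", " (pvGroupRuns chars)

-- ===== PRECONDITION & SPEC =====
def Spec_frequency_of_letters (name : String) (out : String) : Prop := out = frequency_of_letters_alt name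
instance (name : String) (out : String) : Decidable (Spec_frequency_of_letters name out) := by unfold Spec_frequency_of_letters; infer_instance

-- ===== CLAIM (what is proved, stated in full; the proofs are below) =====
def Claim_equal_frequency_of_letters : Prop := ∀ (name : String), Dom_frequency_of_letters name → Spec_frequency_of_letters name (frequency_of_letters name)

-- ===== LEMMAS AND PROOFS =====

-- the first-of-each-run list of a sorted char list (proof-side skeleton of pvGroupRuns)
def pvHeads : List Char → List Char
  | [] => []
  | c :: rest => c :: pvHeads (rest.dropWhile (fun x => x == c))
termination_by l => l.length
decreasing_by
  exact Nat.lt_succ_of_le (List.length_dropWhile_le _ _)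

theorem pv_dropWhile_gt (c : Char) :
    ∀ (rest : List Char), rest.Pairwise (· ≤ ·) → (∀ x ∈ rest, c ≤ x) →
      ∀ x ∈ rest.dropWhile (fun x => x == c), c < x := by
  intro rest
  induction rest with
  | nil => intro _ _ x hx; simp [List.dropWhile] at hx
  | cons y ys ih =>
    intro hp hle x hx
    rw [List.pairwise_cons] at hp
    by_cases hy : (y == c) = true
    · rw [List.dropWhile_cons] at hx
      simp only [hy, if_true] at hx
      exact ih hp.2 (fun z hz => hle z (List.mem_cons_of_mem _ hz)) x hx
    · rw [List.dropWhile_cons] at hx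
      simp only [hy] at hx
      have hcy : c < y := lt_of_le_of_ne (hle y (List.mem_cons_self)) (by
        intro h; exact hy (by simp [← h]))
      rcases List.mem_cons.mp hx with h | h
      · exact h ▸ hcy
      · exact lt_of_lt_of_le hcy (hp.1 x h)

theorem pv_count_head (c : Char) (rest : List Char) (hp : rest.Pairwise (· ≤ ·))
    (hle : ∀ x ∈ rest, c ≤ x) :
    (c :: rest).count c = 1 + (rest.takeWhile (fun x => x == c)).length := by
  have hsplit := List.takeWhile_append_dropWhile (p := fun x => x == c) (l := rest)
  have htake : (rest.takeWhile (fun x => x == c)).count c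
      = (rest.takeWhile (fun x => x == c)).length := by
    rw [List.count_eq_length]
    intro b hb
    have := List.mem_takeWhile_imp hb
    simp at this; simp [this]
  have hdrop : (rest.dropWhile (fun x => x == c)).count c = 0 := by
    rw [List.count_eq_zero]
    intro hmem
    exact absurd rfl (ne_of_gt (pv_dropWhile_gt c rest hp hle c hmem))
  calc (c :: rest).count c = rest.count c + 1 := List.count_cons_self
    _ = ((rest.takeWhile (fun x => x == c)) ++ (rest.dropWhile (fun x => x == c))).count c + 1 := by
        rw [hsplit]
    _ = 1 + (rest.takeWhile (fun x => x == c)).length := by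
        rw [List.count_append, htake, hdrop]; omega

theorem pv_mem_heads : ∀ (M : List Char), M.Pairwise (· ≤ ·) →
    ∀ x, x ∈ pvHeads M ↔ x ∈ M := by
  intro M
  induction M using pvHeads.induct with
  | case1 => intro _ x; simp [pvHeads]
  | case2 c rest ih =>
    intro hp x
    rw [List.pairwise_cons] at hp
    have hdp : (rest.dropWhile (fun x => x == c)).Pairwise (· ≤ ·) :=
      List.Pairwise.sublist (List.dropWhile_sublist _) hp.2
    rw [pvHeads]
    constructor
    · intro hx
      rcases List.mem_cons.mp hx with h | h
      · exact h ▸ List.mem_cons_self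
      · exact List.mem_cons_of_mem _
          ((List.dropWhile_sublist (p := fun x => x == c)).mem ((ih hdp x).mp h))
    · intro hx
      rcases List.mem_cons.mp hx with h | h
      · exact h ▸ List.mem_cons_self
      · rcases (List.mem_append.mp
          ((List.takeWhile_append_dropWhile (p := fun x => x == c) (l := rest)) ▸ h)) with h' | h'
        · have := List.mem_takeWhile_imp h'
          simp at this
          exact this ▸ List.mem_cons_self
        · exact List.mem_cons_of_mem _ ((ih hdp x).mpr h')

theorem pv_heads_lt : ∀ (M : List Char), M.Pairwise (· ≤ ·) →
    (pvHeads M).Pairwise (· < ·) := by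
  intro M
  induction M using pvHeads.induct with
  | case1 => intro _; simp [pvHeads]
  | case2 c rest ih =>
    intro hp
    rw [List.pairwise_cons] at hp
    have hdp : (rest.dropWhile (fun x => x == c)).Pairwise (· ≤ ·) :=
      List.Pairwise.sublist (List.dropWhile_sublist _) hp.2
    rw [pvHeads, List.pairwise_cons]
    refine ⟨fun x hx => ?_, ih hdp⟩
    have hxm : x ∈ rest.dropWhile (fun x => x == c) := (pv_mem_heads _ hdp x).mp hx
    exact pv_dropWhile_gt c rest hp.2 hp.1 x hxm

theorem pv_groupRuns_eq : ∀ (M : List Char), M.Pairwise (· ≤ ·) →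
    pvGroupRuns M = (pvHeads M).map
      (fun c => String.mk [c] ++ "-" ++ PySem.Int.toStr (M.count c)) := by
  intro M
  induction M using pvHeads.induct with
  | case1 => intro _; simp [pvGroupRuns, pvHeads]
  | case2 c rest ih =>
    intro hp
    rw [List.pairwise_cons] at hp
    have hdp : (rest.dropWhile (fun x => x == c)).Pairwise (· ≤ ·) :=
      List.Pairwise.sublist (List.dropWhile_sublist _) hp.2
    rw [pvGroupRuns, pvHeads, List.map_cons, ih hdp]
    have hcount : ((c :: rest).count c : Int)
        = 1 + ((rest.takeWhile (fun x => x == c)).length : Int) := by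
      rw [pv_count_head c rest hp.2 hp.1]; push_cast; ring
    rw [hcount]
    congr 1
    apply List.map_congr_left
    intro d hd
    have hdm : d ∈ rest.dropWhile (fun x => x == c) := (pv_mem_heads _ hdp d).mp hd
    have hdc : c < d := pv_dropWhile_gt c rest hp.2 hp.1 d hdm
    have hcd : (c :: rest).count d = (rest.dropWhile (fun x => x == c)).count d := by
      rw [List.count_cons_of_ne hdc.ne]
      conv_lhs => rw [← List.takeWhile_append_dropWhile (p := fun x => x == c) (l := rest)]
      rw [List.count_append]
      have : (rest.takeWhile (fun x => x == c)).count d = 0 := by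
        rw [List.count_eq_zero]
        intro hmem
        have := List.mem_takeWhile_imp hmem
        simp at this
        exact absurd this hdc.ne'
      omega
    rw [hcd]

theorem pv_foldl_map {α β : Type} (f : α → β) :
    ∀ (l : List α) (acc : List β),
      l.foldl (fun acc c => acc ++ [f c]) acc = acc ++ l.map f := by
  intro l
  induction l with
  | nil => intro acc; simp
  | cons x xs ih => intro acc; simp [List.foldl_cons, ih]

-- ===== VERDICT (by name: the statement is the Claim_ definition above) =====
theorem frequency_of_letters_spec : Claim_equal_frequency_of_letters := by
  unfold Claim_equal_frequency_of_letters
  intro name _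
  unfold Spec_frequency_of_letters
  simp only [frequency_of_letters, frequency_of_letters_alt]
  set L := (PySem.Str.lower name).toList.filter PySem.Chars.isalpha with hL
  set S := PySem.List.sorted L (fun x => x) false with hS
  have hSp : S.Pairwise (· ≤ ·) := by
    have := PySem.List.sorted_pairwise (xs := L) (key := fun x => x)
    simpa [← hS] using this
  rw [← List.foldl_filter, PySem.Dict.foldl_insert_getD_add_one_eq_counter,
    pv_foldl_map, List.nil_append, PySem.Dict.keys_counter, pv_groupRuns_eq S hSp]
  have hheads : PySem.List.sorted (PySem.Set.ofList L) (fun x => x) false = pvHeads S := by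
    apply PySem.List.sorted_eq_of_perm_of_pairwise_lt
    · have hmem : ∀ x, x ∈ pvHeads S ↔ x ∈ PySem.Set.ofList L := by
        intro x
        rw [pv_mem_heads S hSp, PySem.Set.mem_ofList, hS, PySem.List.mem_sorted]
      exact (List.perm_ext_iff_of_nodup (pv_heads_lt S hSp).nodup
        (PySem.Set.nodup_ofList L)).mpr hmem
    · simpa using pv_heads_lt S hSp
  rw [hheads]
  have hmapeq : (pvHeads S).map
        (fun c => String.mk [c] ++ "-" ++ PySem.Int.toStr ((PySem.Dict.counter L).getD c 0))
      = (pvHeads S).map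
        (fun c => String.mk [c] ++ "-" ++ PySem.Int.toStr (S.count c)) := by
    apply List.map_congr_left
    intro c hc
    rw [PySem.Dict.getD_counter,
      ← (PySem.List.sorted_perm L (fun x => x) false).count_eq c]
  rw [hmapeq]
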